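-- pv_equiv track=rewrite | github.com/sbell8-chwy/euler | p65.py | e_converg
-- ===== SOURCE A (Python) =====
-- import itertools
--
-- def e_converg(count):
--     g = e_den()
--     vals = list(itertools.islice(e_den(), 0, count, 1))
--     num = 0
--     den = 1
--     for v in vals[::-1]:
--         num = v * den + num
--         num, den = den, num
--     return 2 * den + num
--
-- def e_den():
--     i = 1
--     while True:
--         yield 1
--         yield 2*i
--         yield 1
--         i += 1
-- ===== SOURCE B (Python) =====
-- def e_converg(count):
--     # Forward convergent recurrence: leading term 2 pre-applied, each CF term
--     # of e computed in closed form (term k is 2*(k//3+1) when k % 3 == 1, else 1).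
--     h_prev2, h_prev1 = 1, 2
--     for k in range(count):
--         term = 2 * (k // 3 + 1) if k % 3 == 1 else 1
--         h_prev2, h_prev1 = h_prev1, term * h_prev1 + h_prev2
--     return h_prev1
-- ===== Notes on version B (the rewrite author's own statement) =====
-- stated objective: simpler
-- what changed: Replaces the generator + materialized term list + reversed backward fold with a single forward pass using the standard convergent recurrence, computing each continued-fraction term of e in closed form from its index instead of drawing it from a generator.
import Mathlib
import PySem

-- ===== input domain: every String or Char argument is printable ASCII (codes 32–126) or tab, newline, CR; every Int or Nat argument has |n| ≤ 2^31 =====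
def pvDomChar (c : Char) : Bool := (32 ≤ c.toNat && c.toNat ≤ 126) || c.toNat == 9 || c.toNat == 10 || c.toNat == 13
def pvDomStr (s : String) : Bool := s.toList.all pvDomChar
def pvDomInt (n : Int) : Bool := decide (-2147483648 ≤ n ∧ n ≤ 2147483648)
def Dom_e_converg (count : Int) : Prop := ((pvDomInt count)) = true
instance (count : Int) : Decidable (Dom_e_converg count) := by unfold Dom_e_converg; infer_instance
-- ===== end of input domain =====

-- B replaces A's generator + materialized list + backward fold by a single forward
-- convergent-recurrence pass with each term computed in closed form from its index (objective: simpler).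

-- ===== PORT A =====
-- first n values of the generator e_den() whose loop counter starts at i (yields 1, 2*i, 1, then i+1, ...)
def eDenTake (i : Nat) : Nat → List Int
  | 0 => []
  | 1 => [1]
  | 2 => [1, (2 * i : Nat)]
  | n + 3 => 1 :: ((2 * i : Nat) : Int) :: 1 :: eDenTake (i + 1) n

def e_converg (count : Int) : Int :=
  -- vals = list(itertools.islice(e_den(), 0, count, 1)); negative count raises ValueError (outside Pre_)
  let vals := eDenTake 1 count.toNat
  -- for v in vals[::-1]: num = v * den + num; num, den = den, num   (state (num, den))
  let s := vals.reverse.foldl (fun (s : Int × Int) v => (s.2, v * s.2 + s.1)) (0, 1)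
  2 * s.2 + s.1

-- ===== PORT B =====
def e_converg_alt (count : Int) : Int :=
  -- h_prev2, h_prev1 = 1, 2; for k in range(count): term = 2*(k//3+1) if k%3==1 else 1; shift
  let s := (PySem.List.pyRange 0 count 1).foldl
    (fun (s : Int × Int) k =>
      let term : Int := if PySem.Int.mod k 3 = 1 then 2 * (PySem.Int.floordiv k 3 + 1) else 1
      (s.2, term * s.2 + s.1)) (1, 2)
  s.2

-- ===== PRECONDITION & SPEC =====
-- Pre_ excludes count < 0, where A's islice raises ValueError (B's range loop is just empty).
def Pre_e_converg (count : Int) : Prop := 0 ≤ count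
instance (count : Int) : Decidable (Pre_e_converg count) := by unfold Pre_e_converg; infer_instance
def pvWitness_e_converg : Int := (5)

def Spec_e_converg (count : Int) (out : Int) : Prop := out = e_converg_alt count
instance (count : Int) (out : Int) : Decidable (Spec_e_converg count out) := by unfold Spec_e_converg; infer_instance

-- ===== CLAIM (what is proved, stated in full; the proofs are below) =====
def Claim_equal_e_converg : Prop := ∀ (count : Int), Dom_e_converg count → Pre_e_converg count → Spec_e_converg count (e_converg count)
-- ===== LEMMAS AND PROOFS =====

-- the closed-form term of B, over a Nat index
def tI (m : Nat) : Int := if m % 3 = 1 then 2 * ((m / 3 : Nat) + 1) else 1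

-- backward (A-side) evaluation of a term list
def bwd (l : List Int) : Int × Int := l.foldr (fun v s => (s.2, v * s.2 + s.1)) (0, 1)

theorem tI_0 (j : Nat) : tI (3 * j) = 1 := by
  unfold tI; rw [if_neg]; omega

theorem tI_1 (j : Nat) : tI (3 * j + 1) = ((2 * (j + 1) : Nat) : Int) := by
  unfold tI
  rw [if_pos (by omega), show (3 * j + 1) / 3 = j by omega]
  push_cast; ring

theorem tI_2 (j : Nat) : tI (3 * j + 2) = 1 := by
  unfold tI; rw [if_neg]; omega

theorem range_add_three (n : Nat) :
    List.range (n + 3) = 0 :: 1 :: 2 :: (List.range n).map (fun m => m + 3) := by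
  simp only [List.range_succ_eq_map, List.map_map, List.map_cons]
  refine congrArg _ (congrArg _ (congrArg _ ?_))
  exact List.map_congr_left (fun m _ => by simp [Function.comp])

theorem eDenTake_eq (j n : Nat) :
    eDenTake (j + 1) n = (List.range n).map (fun m => tI (3 * j + m)) := by
  match n with
  | 0 => simp [eDenTake]
  | 1 => simp [eDenTake, List.range_succ, tI_0]
  | 2 => simp [eDenTake, List.range_succ, tI_0, tI_1]
  | n + 3 =>
    have ih := eDenTake_eq (j + 1) n
    rw [range_add_three]
    simp only [List.map_cons, List.map_map]
    show (1 : Int) :: ((2 * (j + 1) : Nat) : Int) :: 1 :: eDenTake (j + 1 + 1) n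
        = tI (3 * j + 0) :: tI (3 * j + 1) :: tI (3 * j + 2)
          :: (List.range n).map ((fun m => tI (3 * j + m)) ∘ fun m => m + 3)
    rw [ih]
    simp only [Nat.add_zero, tI_0, tI_1, tI_2]
    refine congrArg _ (congrArg _ (congrArg _ ?_))
    exact List.map_congr_left (fun m _ => by
      simp only [Function.comp]
      congr 1
      omega)

theorem fwd_eq_bwd (l : List Int) (a b : Int) :
    (l.foldl (fun s v => (s.2, v * s.2 + s.1)) (a, b)).2
      = b * (bwd l).2 + a * (bwd l).1 := by
  induction l generalizing a b with
  | nil => simp [bwd]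
  | cons v t ih =>
    simp only [List.foldl_cons, bwd, List.foldr_cons]
    rw [ih]
    show (v * b + a) * (bwd t).2 + b * (bwd t).1
        = b * (v * (bwd t).2 + (bwd t).1) + a * (bwd t).2
    ring

theorem fwd_nat (l : List Nat) (a b : Int) :
    (l.foldl (fun (s : Int × Int) k => (s.2, tI k * s.2 + s.1)) (a, b)).2
      = b * (bwd (l.map tI)).2 + a * (bwd (l.map tI)).1 := by
  have h := fwd_eq_bwd (l.map tI) a b
  rwa [List.foldl_map] at h

-- B's inline step agrees with tI on a cast-Nat index
theorem step_cast (m : Nat) :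
    (if PySem.Int.mod (m : Int) 3 = 1 then 2 * (PySem.Int.floordiv (m : Int) 3 + 1) else 1)
      = tI m := by
  have hm : PySem.Int.mod (m : Int) 3 = ((m % 3 : Nat) : Int) := by
    exact_mod_cast PySem.Int.mod_natCast m 3
  have hd : PySem.Int.floordiv (m : Int) 3 = ((m / 3 : Nat) : Int) := by
    exact_mod_cast PySem.Int.floordiv_natCast m 3
  simp only [hm, hd, tI]
  by_cases h : m % 3 = 1
  · rw [if_pos (by exact_mod_cast congrArg (Nat.cast : Nat -> Int) h), if_pos h]
  · rw [if_neg (fun hc => h (by exact_mod_cast hc)), if_neg h]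

theorem e_converg_eq_alt (count : Int) (_h : 0 <= count) :
    e_converg count = e_converg_alt count := by
  unfold e_converg e_converg_alt
  rw [PySem.List.pyRange_one]
  simp only [Int.sub_zero, zero_add]
  rw [List.foldl_map, List.foldl_reverse]
  have hterms : eDenTake 1 count.toNat = (List.range count.toNat).map tI := by
    simpa using eDenTake_eq 0 count.toNat
  rw [hterms]
  have hstep : (fun (s : Int × Int) (k : Nat) =>
      (s.2, (if PySem.Int.mod (k : Int) 3 = 1 then 2 * (PySem.Int.floordiv (k : Int) 3 + 1) else 1)
        * s.2 + s.1))
      = fun (s : Int × Int) (k : Nat) => (s.2, tI k * s.2 + s.1) := by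
    funext s k; rw [step_cast]
  rw [hstep, fwd_nat (List.range count.toNat) 1 2]
  have hb : (((List.range count.toNat).map tI).foldr
      (fun x (s : Int × Int) => (s.2, x * s.2 + s.1)) (0, 1))
      = bwd ((List.range count.toNat).map tI) := rfl
  rw [hb]
  ring

-- ===== VERDICT (by name: the statement is the Claim_ definition above) =====
theorem e_converg_spec : Claim_equal_e_converg := by
  intro count _ hpre
  unfold Spec_e_converg
  exact e_converg_eq_alt count hpre
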